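-- pv_equiv track=rewrite | github.com/velzevur/gohugo-theme-rotary | example/scripts/list_tags.py | parse_list_of_tags
-- ===== SOURCE A (Python) =====
-- def parse_list_of_tags(line):
--     res = []
--     temp_tag = ""
--     in_tag = False
--     for c in line:
--         if(c == "\"" or c == "'"):
--             if(not in_tag):
--                 in_tag = True
--             else:
--                 in_tag = False
--                 if(temp_tag != ""):
--                     res.append(temp_tag)
--                     temp_tag = ""
--         else:
--             if(in_tag):
--                 temp_tag = temp_tag + c
--     return res
-- ===== SOURCE B (Python) =====
-- def parse_list_of_tags(line):
--     parts = [p for chunk in line.split('"') for p in chunk.split("'")]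
--     return [t for i, t in enumerate(parts[:-1]) if i % 2 and t]
-- ===== Notes on version B (the rewrite author's own statement) =====
-- stated objective: idiomatic
-- what changed: A's per-character state machine (in_tag flag, accumulating temp_tag) is replaced by splitting the line on both quote characters and keeping the odd-indexed, non-final, nonempty chunks.
import Mathlib
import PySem

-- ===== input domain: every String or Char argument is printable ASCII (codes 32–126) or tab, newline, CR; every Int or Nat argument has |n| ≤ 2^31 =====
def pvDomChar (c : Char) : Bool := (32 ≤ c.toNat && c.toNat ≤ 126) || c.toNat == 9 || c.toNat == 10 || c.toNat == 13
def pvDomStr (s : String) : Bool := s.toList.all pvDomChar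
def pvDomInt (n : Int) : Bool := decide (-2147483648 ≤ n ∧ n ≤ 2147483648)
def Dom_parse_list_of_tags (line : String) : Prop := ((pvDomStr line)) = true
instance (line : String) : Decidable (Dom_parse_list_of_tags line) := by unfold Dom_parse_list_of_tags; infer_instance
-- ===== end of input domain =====

-- B replaces A's per-character quote state machine by split-on-both-quotes + keep the
-- odd-indexed, non-final, nonempty chunks (objective: idiomatic; measured faster in a timing run).

-- ===== PORT A =====
-- the loop body of A, one step of the state (res, temp_tag, in_tag); tag text kept as List Char
def stepA (st : List String × List Char × Bool) (c : Char) : List String × List Char × Bool :=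
  match st with
  | (res, temp, in_tag) =>
    if c = '"' ∨ c = '\'' then
      if in_tag = false then (res, temp, true)
      else
        if temp ≠ [] then (res ++ [String.ofList temp], [], false)
        else (res, temp, false)
    else
      if in_tag then (res, temp ++ [c], in_tag) else (res, temp, in_tag)

def parse_list_of_tags (line : String) : List String :=
  (line.toList.foldl stepA ([], [], false)).1

-- ===== PORT B =====
-- Source B: parts = [p for chunk in line.split('"') for p in chunk.split("'")]
--       return [t for i, t in enumerate(parts[:-1]) if i % 2 and t]
-- str.split with a one-char separator is List.splitOn on the code points (exact);
-- parts[:-1] is PySem.List.slice with stop -1; enumerate is PySem.List.enumerate;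
-- Python's truthy `i % 2` is `PySem.Int.mod i 2 != 0`, truthy `t` is `t != ""`.
def parse_list_of_tags_alt (line : String) : List String :=
  ((PySem.List.enumerate
      (PySem.List.slice
        (((line.toList.splitOn '"').flatMap (fun chunk => chunk.splitOn '\'')).map String.ofList)
        none (some (-1)))).filter
    (fun it => PySem.Int.mod it.1 2 != 0 && it.2 != "")).map Prod.snd

-- ===== PRECONDITION & SPEC =====
def Spec_parse_list_of_tags (line : String) (out : List String) : Prop := out = parse_list_of_tags_alt line
instance (line : String) (out : List String) : Decidable (Spec_parse_list_of_tags line out) := by unfold Spec_parse_list_of_tags; infer_instance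

-- ===== CLAIM (what is proved, stated in full; the proofs are below) =====
def Claim_equal_parse_list_of_tags : Prop := ∀ (line : String), Dom_parse_list_of_tags line → Spec_parse_list_of_tags line (parse_list_of_tags line)

-- ===== LEMMAS AND PROOFS =====

-- "c is a quote": the split predicate both programs are really driven by
def isQ (c : Char) : Bool := c == '"' || c == '\''

-- the chunks A emits: odd-position (flag true), non-final, nonempty chunks
def sel (odd : Bool) : List (List Char) → List (List Char)
  | [] => []
  | x :: r =>
      if odd then (if r ≠ [] ∧ x ≠ [] then [x] else []) ++ sel false r
      else sel true r

-- splitting on '"' and then each chunk on '\'' = splitting once on either quote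
theorem flatMap_split (cs : List Char) :
    ((cs.splitOn '"').flatMap (fun chunk => chunk.splitOn '\'')) = cs.splitOnP isQ := by
  induction cs with
  | nil => rfl
  | cons c cs ih =>
    simp only [List.splitOn] at *
    rw [List.splitOnP_cons, List.splitOnP_cons (p := isQ)]
    by_cases h1 : c = '"'
    · subst h1
      simp only [beq_self_eq_true, if_pos, isQ, Bool.true_or, List.flatMap_cons]
      rw [← ih]
      rfl
    · obtain ⟨h, t, he⟩ := List.exists_cons_of_ne_nil (List.splitOnP_ne_nil (· == '"') cs)
      have h1' : (c == '"') = false := by simp [h1]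
      rw [h1']
      simp only [Bool.false_eq_true, if_false, he, List.modifyHead_cons, List.flatMap_cons]
      rw [he, List.flatMap_cons] at ih
      by_cases h2 : c = '\''
      · subst h2
        have hq : isQ '\'' = true := by decide
        rw [hq]
        simp only [if_pos]
        rw [List.splitOnP_cons]
        simp only [beq_self_eq_true, if_pos]
        rw [← ih, List.cons_append]
      · have hq : isQ c = false := by simp [isQ, h1, h2]
        have h2' : (c == '\'') = false := by simp [h2]
        rw [hq]
        simp only [Bool.false_eq_true, if_false]
        rw [List.splitOnP_cons, h2']
        simp only [Bool.false_eq_true, if_false]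
        obtain ⟨h2l, t2, he2⟩ := List.exists_cons_of_ne_nil (List.splitOnP_ne_nil (· == '\'') h)
        rw [he2, List.modifyHead_cons, ← ih, he2, List.cons_append]
        simp

-- A's fold computes res ++ the selected chunks (temp is empty whenever in_tag is false)
theorem foldA (cs : List Char) (res : List String) (temp : List Char) (b : Bool)
    (h : b = false → temp = []) :
    ((cs.foldl stepA (res, temp, b)).1)
    = res ++ (if b then sel true ((cs.splitOnP isQ).modifyHead (temp ++ ·))
              else sel false (cs.splitOnP isQ)).map String.ofList := by
  induction cs generalizing res temp b with
  | nil =>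
    cases b
    · simp [List.splitOnP_nil, sel]
    · simp [List.splitOnP_nil, sel]
  | cons c cs ih =>
    rw [List.foldl_cons, List.splitOnP_cons]
    simp only [stepA]
    by_cases hq : c = '"' ∨ c = '\''
    · have hq' : isQ c = true := by rcases hq with h|h <;> simp [isQ, h]
      rw [if_pos hq, hq']
      simp only [if_pos]
      cases b with
      | false =>
        have ht : temp = [] := h rfl
        subst ht
        simp only [Bool.false_eq_true, reduceIte]
        rw [ih _ _ _ (fun hc => by cases hc)]
        have hid : ∀ (l : List (List Char)), List.modifyHead (fun x => x) l = l :=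
          fun l => by cases l <;> rfl
        simp [sel, hid]
      | true =>
        simp only [Bool.true_eq_false, reduceIte]
        by_cases ht : temp = []
        · subst ht
          simp only [ne_eq, not_true_eq_false, reduceIte]
          rw [ih _ _ _ (fun _ => rfl)]
          simp [sel, List.splitOnP_ne_nil]
        · rw [if_pos (by simpa using ht)]
          rw [ih _ _ _ (fun _ => rfl)]
          simp [sel, List.splitOnP_ne_nil, ht]
    · have hq' : isQ c = false := by
        simp only [isQ]; rcases not_or.mp hq with ⟨a, b⟩; simp [a, b]
      rw [if_neg hq, hq']
      simp only [Bool.false_eq_true, reduceIte]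
      cases b with
      | false =>
        have ht : temp = [] := h rfl
        subst ht
        simp only [Bool.false_eq_true, reduceIte]
        rw [ih _ _ _ (fun _ => rfl)]
        obtain ⟨x, r, he⟩ := List.exists_cons_of_ne_nil (List.splitOnP_ne_nil isQ cs)
        rw [he]
        simp [sel]
      | true =>
        simp only [reduceIte]
        rw [ih _ _ _ (fun hc => by cases hc)]
        obtain ⟨x, r, he⟩ := List.exists_cons_of_ne_nil (List.splitOnP_ne_nil isQ cs)
        rw [he]
        simp [sel]

-- B's enumerate/filter pipeline computes exactly the selected chunks
theorem selB (l : List (List Char)) (n : Int) (b : Bool) (hn : 0 ≤ n)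
    (hb : (PySem.Int.mod n 2 != 0) = b) :
    ((PySem.List.enumerate ((l.map String.ofList).dropLast) n).filter
        (fun it => PySem.Int.mod it.1 2 != 0 && it.2 != "")).map Prod.snd
    = (sel b l).map String.ofList := by
  induction l generalizing n b with
  | nil => simp [sel]
  | cons x r ih =>
    cases r with
    | nil => simp [sel]
    | cons y t =>
      have hd : ((x :: y :: t).map String.ofList).dropLast
          = String.ofList x :: ((y :: t).map String.ofList).dropLast := by
        simp [List.dropLast_cons_of_ne_nil]
      rw [hd]
      simp only [PySem.List.enumerate, List.filter_cons]
      have hflip : (PySem.Int.mod (n + 1) 2 != 0) = !b := by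
        rw [← hb]
        rw [PySem.Int.mod_eq_emod_of_pos (by omega), PySem.Int.mod_eq_emod_of_pos (by omega)]
        rcases Int.emod_two_eq_zero_or_one n with h | h <;> simp [h] <;> omega
      cases b with
      | false =>
        simp only [hb, Bool.false_and, Bool.false_eq_true, if_false]
        rw [ih (n + 1) true (by omega) (by simpa using hflip)]
        rfl
      | true =>
        by_cases hx : x = []
        · subst hx
          have hc : ((PySem.Int.mod n 2 != 0) && (String.ofList ([] : List Char) != "")) = false := by
            simp
          rw [hc]
          simp only [Bool.false_eq_true, if_false]
          rw [ih (n + 1) false (by omega) (by simpa using hflip)]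
          simp [sel]
        · have hmk : (String.ofList x != "") = true := by
            simp only [bne_iff_ne, ne_eq]
            intro hcon
            exact hx (by simpa using congrArg String.toList hcon)
          rw [hb, hmk]
          simp only [Bool.and_self, if_pos, List.map_cons]
          rw [← List.map_cons, ih (n + 1) false (by omega) (by simpa using hflip)]
          simp [sel, hx]

-- ===== VERDICT (by name: the statement is the Claim_ definition above) =====
theorem parse_list_of_tags_spec : Claim_equal_parse_list_of_tags := by
  intro line _
  unfold Spec_parse_list_of_tags parse_list_of_tags parse_list_of_tags_alt
  rw [flatMap_split, foldA _ _ _ _ (fun _ => rfl), PySem.List.slice_to_neg_one,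
    selB _ 0 false le_rfl (by decide)]
  simp
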